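-- pv_equiv track=rewrite | github.com/Pillar-Biosciences-Inc/StateCNV | scripts/comparison_methods.py | sum_confusion_counts
-- ===== SOURCE A (Python) =====
-- def sum_confusion_counts(dict_list):
--     """
--     Sums the confusion matrix values across a list of dictionaries.
--
--     Parameters:
--     - dict_list: list of dictionaries, each with keys 'TP', 'FP', 'FN', 'TN'
--
--     Returns:
--     - TP, FP, FN, TN: summed values
--     """
--     TP = FP = FN = TN = 0
--     for d in dict_list:
--         TP += d.get("TP", 0)
--         FP += d.get("FP", 0)
--         FN += d.get("FN", 0)
--         TN += d.get("TN", 0)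
--     return TP, FP, FN, TN
-- ===== SOURCE B (Python) =====
-- def sum_confusion_counts(dict_list):
--     """Divide-and-conquer: split the list in half, sum each half recursively,
--     and add the two 4-tuples componentwise (correct by associativity of +)."""
--     n = len(dict_list)
--     if n == 0:
--         return (0, 0, 0, 0)
--     if n == 1:
--         d = dict_list[0]
--         return (d.get("TP", 0), d.get("FP", 0), d.get("FN", 0), d.get("TN", 0))
--     mid = n // 2
--     l = sum_confusion_counts(dict_list[:mid])
--     r = sum_confusion_counts(dict_list[mid:])
--     return (l[0] + r[0], l[1] + r[1], l[2] + r[2], l[3] + r[3])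
-- ===== Notes on version B (the rewrite author's own statement) =====
-- stated objective: alternative
-- what changed: Replaces A's single fused left-to-right accumulator loop with a divide-and-conquer tree reduction: split the list in half, recurse on each half, and add the two 4-tuples componentwise.
import Mathlib
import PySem

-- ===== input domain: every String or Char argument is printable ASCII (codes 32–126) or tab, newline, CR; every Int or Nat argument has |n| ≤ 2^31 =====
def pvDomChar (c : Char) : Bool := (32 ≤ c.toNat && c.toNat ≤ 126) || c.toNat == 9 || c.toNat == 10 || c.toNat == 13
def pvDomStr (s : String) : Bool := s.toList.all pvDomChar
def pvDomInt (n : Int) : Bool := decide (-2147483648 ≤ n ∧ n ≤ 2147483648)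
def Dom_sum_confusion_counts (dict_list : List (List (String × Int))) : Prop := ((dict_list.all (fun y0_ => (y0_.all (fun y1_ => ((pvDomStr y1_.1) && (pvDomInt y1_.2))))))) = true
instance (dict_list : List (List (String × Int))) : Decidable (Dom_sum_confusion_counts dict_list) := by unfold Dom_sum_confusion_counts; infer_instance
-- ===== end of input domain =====

-- B replaces A's fused accumulator loop with a divide-and-conquer tree reduction
-- (split in half, recurse, add 4-tuples componentwise); objective: alternative.


-- ===== PORT A =====
def sum_confusion_counts (dict_list : List (List (String × Int))) : Int × Int × Int × Int :=
  dict_list.foldl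
    (fun st d =>
      (st.1 + PySem.Dict.getD (PySem.Dict.mk d) "TP" 0,
       st.2.1 + PySem.Dict.getD (PySem.Dict.mk d) "FP" 0,
       st.2.2.1 + PySem.Dict.getD (PySem.Dict.mk d) "FN" 0,
       st.2.2.2 + PySem.Dict.getD (PySem.Dict.mk d) "TN" 0))
    (0, 0, 0, 0)

-- ===== PORT B =====
-- divide-and-conquer, following Source B: empty → zeros; singleton → its four values;
-- otherwise split at len // 2, recurse on both halves, add componentwise.
def addQ (l r : Int × Int × Int × Int) : Int × Int × Int × Int :=
  (l.1 + r.1, l.2.1 + r.2.1, l.2.2.1 + r.2.2.1, l.2.2.2 + r.2.2.2)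

def sum_confusion_counts_alt (dict_list : List (List (String × Int))) : Int × Int × Int × Int :=
  match dict_list with
  | [] => (0, 0, 0, 0)
  | [d] =>
      (PySem.Dict.getD (PySem.Dict.mk d) "TP" 0,
       PySem.Dict.getD (PySem.Dict.mk d) "FP" 0,
       PySem.Dict.getD (PySem.Dict.mk d) "FN" 0,
       PySem.Dict.getD (PySem.Dict.mk d) "TN" 0)
  | x :: y :: rest =>
      addQ
        (sum_confusion_counts_alt ((x :: y :: rest).take ((x :: y :: rest).length / 2)))
        (sum_confusion_counts_alt ((x :: y :: rest).drop ((x :: y :: rest).length / 2)))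
termination_by dict_list.length
decreasing_by
  · simp [List.length_take]; omega
  · simp [List.length_drop]; omega

-- ===== PRECONDITION & SPEC =====
def Spec_sum_confusion_counts (dict_list : List (List (String × Int))) (out : Int × Int × Int × Int) : Prop := out = sum_confusion_counts_alt dict_list
instance (dict_list : List (List (String × Int))) (out : Int × Int × Int × Int) : Decidable (Spec_sum_confusion_counts dict_list out) := by unfold Spec_sum_confusion_counts; infer_instance

-- ===== CLAIM (what is proved, stated in full; the proofs are below) =====
def Claim_equal_sum_confusion_counts : Prop := ∀ (dict_list : List (List (String × Int))), Dom_sum_confusion_counts dict_list → Spec_sum_confusion_counts dict_list (sum_confusion_counts dict_list)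

-- ===== LEMMAS AND PROOFS =====
-- the common value both ports compute: the four componentwise sums
def tot (dict_list : List (List (String × Int))) : Int × Int × Int × Int :=
  ((dict_list.map (fun d => PySem.Dict.getD (PySem.Dict.mk d) "TP" 0)).sum,
   (dict_list.map (fun d => PySem.Dict.getD (PySem.Dict.mk d) "FP" 0)).sum,
   (dict_list.map (fun d => PySem.Dict.getD (PySem.Dict.mk d) "FN" 0)).sum,
   (dict_list.map (fun d => PySem.Dict.getD (PySem.Dict.mk d) "TN" 0)).sum)

theorem tot_append (a b : List (List (String × Int))) :
    tot (a ++ b) = addQ (tot a) (tot b) := by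
  simp only [tot, addQ, List.map_append, List.sum_append]

theorem alt_eq_tot (l : List (List (String × Int))) :
    sum_confusion_counts_alt l = tot l := by
  fun_induction sum_confusion_counts_alt l with
  | case1 => simp [tot]
  | case2 d => simp [tot]
  | case3 x y rest ihl ihr =>
      rw [ihl, ihr]
      rw [show tot (x :: y :: rest)
            = tot (((x :: y :: rest).take ((x :: y :: rest).length / 2))
               ++ ((x :: y :: rest).drop ((x :: y :: rest).length / 2)))
          from by rw [List.take_append_drop]]
      rw [tot_append]

theorem fold_eq (dict_list : List (List (String × Int))) (a b c e : Int) :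
    dict_list.foldl
      (fun st d =>
        (st.1 + PySem.Dict.getD (PySem.Dict.mk d) "TP" 0,
         st.2.1 + PySem.Dict.getD (PySem.Dict.mk d) "FP" 0,
         st.2.2.1 + PySem.Dict.getD (PySem.Dict.mk d) "FN" 0,
         st.2.2.2 + PySem.Dict.getD (PySem.Dict.mk d) "TN" 0))
      (a, b, c, e)
    = (a + (tot dict_list).1, b + (tot dict_list).2.1,
       c + (tot dict_list).2.2.1, e + (tot dict_list).2.2.2) := by
  induction dict_list generalizing a b c e with
  | nil => simp [tot]
  | cons d t ih =>
    simp only [List.foldl_cons, ih, tot, List.map_cons, List.sum_cons]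
    refine Prod.ext (by ring) (Prod.ext (by ring) (Prod.ext (by ring) (by ring)))

-- ===== VERDICT (by name: the statement is the Claim_ definition above) =====
theorem sum_confusion_counts_spec : Claim_equal_sum_confusion_counts := by
  intro dict_list _
  unfold Spec_sum_confusion_counts sum_confusion_counts
  rw [alt_eq_tot, fold_eq]
  simp
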